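-- pv_equiv track=rewrite | github.com/RuslanMagdy/Word-proccesing | kring.py | sym_invr
-- ===== SOURCE A (Python) =====
-- def sym_invr(T12,T13,T23, t3,t2,t1): #инволюция из симметрий на Z^3
--   if t1<0:
--     return sym_invr(-T12, -T13,T23, t3,t2,-t1)
--   elif t2<0:
--     return sym_invr(-T12,T13,-T23, t3,-t2,t1)
--   elif t3<0:
--     return sym_invr(T12,-T13,-T23, -t3,t2,t1)
--   else:
--     return [T12,T13,T23,t3,t2,t1]
-- ===== SOURCE B (Python) =====
-- def sym_invr(T12, T13, T23, t3, t2, t1):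
--     s1 = -1 if t1 < 0 else 1
--     s2 = -1 if t2 < 0 else 1
--     s3 = -1 if t3 < 0 else 1
--     return [T12 * s1 * s2, T13 * s1 * s3, T23 * s2 * s3, s3 * t3, s2 * t2, s1 * t1]
-- ===== Notes on version B (the rewrite author's own statement) =====
-- stated objective: simpler
-- what changed: Replaced the recursive sign-flipping (up to three self-calls) by a direct closed form: compute the three sign factors once and return the list in one expression.
import Mathlib
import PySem

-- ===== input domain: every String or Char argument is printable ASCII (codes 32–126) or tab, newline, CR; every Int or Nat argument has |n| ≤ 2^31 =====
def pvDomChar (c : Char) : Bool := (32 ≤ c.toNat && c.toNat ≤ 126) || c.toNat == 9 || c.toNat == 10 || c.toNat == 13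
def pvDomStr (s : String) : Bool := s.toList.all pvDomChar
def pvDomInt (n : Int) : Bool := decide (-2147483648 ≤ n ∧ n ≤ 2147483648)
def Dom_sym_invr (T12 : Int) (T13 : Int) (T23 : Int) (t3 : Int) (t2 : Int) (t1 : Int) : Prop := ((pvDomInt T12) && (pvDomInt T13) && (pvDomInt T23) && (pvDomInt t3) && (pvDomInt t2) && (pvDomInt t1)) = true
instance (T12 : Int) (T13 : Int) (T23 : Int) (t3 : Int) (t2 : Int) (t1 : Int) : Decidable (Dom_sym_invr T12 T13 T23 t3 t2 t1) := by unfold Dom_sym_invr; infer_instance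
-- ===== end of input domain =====

-- B replaces A's recursive sign-flipping with a closed-form sign-factor computation (simpler).


-- ===== PORT A =====
def sym_invr (T12 : Int) (T13 : Int) (T23 : Int) (t3 : Int) (t2 : Int) (t1 : Int) : List Int :=
  if t1 < 0 then sym_invr (-T12) (-T13) T23 t3 t2 (-t1)
  else if t2 < 0 then sym_invr (-T12) T13 (-T23) t3 (-t2) t1
  else if t3 < 0 then sym_invr T12 (-T13) (-T23) (-t3) t2 t1
  else [T12, T13, T23, t3, t2, t1]
termination_by (if t1 < 0 then 1 else 0) + (if t2 < 0 then 1 else 0) + (if t3 < 0 then (1:Nat) else 0)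
decreasing_by all_goals (split_ifs <;> omega)

-- ===== PORT B =====
def sym_invr_alt (T12 : Int) (T13 : Int) (T23 : Int) (t3 : Int) (t2 : Int) (t1 : Int) : List Int :=
  let s1 : Int := if t1 < 0 then -1 else 1
  let s2 : Int := if t2 < 0 then -1 else 1
  let s3 : Int := if t3 < 0 then -1 else 1
  [T12 * s1 * s2, T13 * s1 * s3, T23 * s2 * s3, s3 * t3, s2 * t2, s1 * t1]

-- ===== PRECONDITION & SPEC =====
def Spec_sym_invr (T12 : Int) (T13 : Int) (T23 : Int) (t3 : Int) (t2 : Int) (t1 : Int) (out : List Int) : Prop := out = sym_invr_alt T12 T13 T23 t3 t2 t1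
instance (T12 : Int) (T13 : Int) (T23 : Int) (t3 : Int) (t2 : Int) (t1 : Int) (out : List Int) : Decidable (Spec_sym_invr T12 T13 T23 t3 t2 t1 out) := by unfold Spec_sym_invr; infer_instance

-- ===== CLAIM (what is proved, stated in full; the proofs are below) =====
def Claim_equal_sym_invr : Prop := ∀ (T12 : Int) (T13 : Int) (T23 : Int) (t3 : Int) (t2 : Int) (t1 : Int), Dom_sym_invr T12 T13 T23 t3 t2 t1 → Spec_sym_invr T12 T13 T23 t3 t2 t1 (sym_invr T12 T13 T23 t3 t2 t1)

-- ===== LEMMAS AND PROOFS =====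

-- ===== VERDICT (by name: the statement is the Claim_ definition above) =====
-- A's recursion computes B's closed form: induction on A's call structure
theorem sym_invr_eq_alt (T12 T13 T23 t3 t2 t1 : Int) :
    sym_invr T12 T13 T23 t3 t2 t1 = sym_invr_alt T12 T13 T23 t3 t2 t1 := by
  fun_induction sym_invr with
  | case1 T12 T13 T23 t3 t2 t1 h1 ih =>
      rw [ih]; simp only [sym_invr_alt]
      split_ifs <;> simp_all <;> omega
  | case2 T12 T13 T23 t3 t2 t1 h1 h2 ih =>
      rw [ih]; simp only [sym_invr_alt]
      split_ifs <;> simp_all <;> omega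
  | case3 T12 T13 T23 t3 t2 t1 h1 h2 h3 ih =>
      rw [ih]; simp only [sym_invr_alt]
      split_ifs <;> simp_all <;> omega
  | case4 T12 T13 T23 t3 t2 t1 h1 h2 h3 =>
      simp only [sym_invr_alt]
      split_ifs <;> simp_all

theorem sym_invr_spec : Claim_equal_sym_invr := by
  intro T12 T13 T23 t3 t2 t1 _
  unfold Spec_sym_invr
  exact sym_invr_eq_alt T12 T13 T23 t3 t2 t1
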